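-- pv_equiv track=rewrite | github.com/kvmilos/OREX | apki/porownanie/compare.py | match_lists
-- ===== SOURCE A (Python) =====
-- def match_lists(list1, list2):
--     matches = []
--     unmatched_list1 = list1.copy()
--     unmatched_list2 = list2.copy()
--
--     for i in list1:
--         if i in unmatched_list2:
--             matches.append((i, i))
--             unmatched_list1.remove(i)
--             unmatched_list2.remove(i)
--
--
--     return matches, unmatched_list1, unmatched_list2
-- ===== SOURCE B (Python) =====
-- def match_lists(list1, list2):
--     cnt = {}
--     for j in list2:
--         cnt[j] = cnt.get(j, 0) + 1
--     matches = []
--     unmatched_list1 = []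
--     used = {}
--     for i in list1:
--         if cnt.get(i, 0) > 0:
--             cnt[i] -= 1
--             used[i] = used.get(i, 0) + 1
--             matches.append((i, i))
--         else:
--             unmatched_list1.append(i)
--     unmatched_list2 = []
--     for j in list2:
--         if used.get(j, 0) > 0:
--             used[j] -= 1
--         else:
--             unmatched_list2.append(j)
--     return matches, unmatched_list1, unmatched_list2
-- ===== Notes on version B (the rewrite author's own statement) =====
-- stated objective: faster
-- what changed: Replaced A's per-element membership scan plus two list.remove calls (each O(n)) with a count dictionary of list2, a single decrementing pass over list1, and a single reconstruction pass over list2.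
import Mathlib
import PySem

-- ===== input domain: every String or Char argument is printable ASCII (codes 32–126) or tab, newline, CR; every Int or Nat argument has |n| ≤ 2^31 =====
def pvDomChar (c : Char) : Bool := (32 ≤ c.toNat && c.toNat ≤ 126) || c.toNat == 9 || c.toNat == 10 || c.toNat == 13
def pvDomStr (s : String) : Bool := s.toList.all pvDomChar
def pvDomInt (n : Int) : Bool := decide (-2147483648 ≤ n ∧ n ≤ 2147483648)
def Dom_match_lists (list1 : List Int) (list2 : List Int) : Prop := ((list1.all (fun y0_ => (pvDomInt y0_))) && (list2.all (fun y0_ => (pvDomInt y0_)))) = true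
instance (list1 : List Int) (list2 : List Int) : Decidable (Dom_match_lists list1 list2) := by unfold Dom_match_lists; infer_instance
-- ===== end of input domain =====

-- B replaces A's quadratic scan-and-remove loop by a count dictionary of list2, one pass
-- over list1 decrementing counts, and one reconstruction pass over list2 (O(n+m)).

-- ===== PORT A =====
-- loop body of A: 'if i in unmatched_list2: matches.append((i,i)); unmatched_list1.remove(i); unmatched_list2.remove(i)'
-- (list.remove never raises here: the guard guarantees the element is present in both lists; .getD is the unreached fallback)
def pvStepA (s : (List (Int × Int)) × List Int × List Int) (i : Int) :
    (List (Int × Int)) × List Int × List Int :=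
  if i ∈ s.2.2 then
    (s.1 ++ [(i, i)], (PySem.List.remove? s.2.1 i).getD s.2.1,
      (PySem.List.remove? s.2.2 i).getD s.2.2)
  else s

def match_lists (list1 : List Int) (list2 : List Int) :
    (List (Int × Int)) × List Int × List Int :=
  list1.foldl pvStepA ([], list1, list2)

-- ===== PORT B =====
-- first loop of Source B: 'cnt[j] = cnt.get(j, 0) + 1'
def pvCnt (list2 : List Int) : PySem.Dict Int Int :=
  list2.foldl (fun d j => d.insert j (d.getD j 0 + 1)) PySem.Dict.empty

-- second loop of Source B: state (cnt, used, matches, unmatched_list1)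
def pvStepB (s : PySem.Dict Int Int × PySem.Dict Int Int × List (Int × Int) × List Int)
    (i : Int) : PySem.Dict Int Int × PySem.Dict Int Int × List (Int × Int) × List Int :=
  if 0 < s.1.getD i 0 then
    (s.1.insert i (s.1.getD i 0 - 1), s.2.1.insert i (s.2.1.getD i 0 + 1),
      s.2.2.1 ++ [(i, i)], s.2.2.2)
  else
    (s.1, s.2.1, s.2.2.1, s.2.2.2 ++ [i])

-- third loop of Source B: state (used, unmatched_list2)
def pvStepB2 (s : PySem.Dict Int Int × List Int) (j : Int) :
    PySem.Dict Int Int × List Int :=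
  if 0 < s.1.getD j 0 then (s.1.insert j (s.1.getD j 0 - 1), s.2)
  else (s.1, s.2 ++ [j])

def match_lists_alt (list1 : List Int) (list2 : List Int) :
    (List (Int × Int)) × List Int × List Int :=
  let s1 := list1.foldl pvStepB (pvCnt list2, PySem.Dict.empty, [], [])
  let s2 := list2.foldl pvStepB2 (s1.2.1, [])
  (s1.2.2.1, s1.2.2.2, s2.2)

-- ===== PRECONDITION & SPEC =====
def Spec_match_lists (list1 : List Int) (list2 : List Int) (out : (List (Int × Int)) × List Int × List Int) : Prop := out = match_lists_alt list1 list2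
instance (list1 : List Int) (list2 : List Int) (out : (List (Int × Int)) × List Int × List Int) : Decidable (Spec_match_lists list1 list2 out) := by unfold Spec_match_lists; infer_instance

-- ===== CLAIM (what is proved, stated in full; the proofs are below) =====
def Claim_equal_match_lists : Prop := ∀ (list1 : List Int) (list2 : List Int), Dom_match_lists list1 list2 → Spec_match_lists list1 list2 (match_lists list1 list2)

-- ===== LEMMAS AND PROOFS =====

-- abstraction of a "used" dictionary as a function Int → Int
def pvBump (v : Int) (f : Int → Int) : Int → Int := fun x => if x = v then f x + 1 else f x
def pvDec (v : Int) (f : Int → Int) : Int → Int := fun x => if x = v then f x - 1 else f x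

-- 'list2 with the first (f v) occurrences of each v removed' — the value of Source B's third loop
def pvStrip (f : Int → Int) : List Int → List Int
  | [] => []
  | j :: l => if 0 < f j then pvStrip (pvDec j f) l else j :: pvStrip f l

lemma pvStrip_zero (l : List Int) : pvStrip (fun _ => 0) l = l := by
  induction l with
  | nil => rfl
  | cons j l ih => simp [pvStrip, ih]

lemma pvStepB2_foldl (l : List Int) (d : PySem.Dict Int Int) (acc : List Int) :
    (l.foldl pvStepB2 (d, acc)).2 = acc ++ pvStrip (fun v => d.getD v 0) l := by
  induction l generalizing d acc with
  | nil => simp [pvStrip]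
  | cons j l ih =>
    simp only [List.foldl_cons, pvStepB2, pvStrip]
    by_cases h : 0 < d.getD j 0
    · simp only [h, if_pos]
      rw [ih]
      congr 2
      funext v
      rw [PySem.Dict.getD_insert]
      by_cases hv : v = j <;> simp [pvDec, hv]
    · simp only [h, if_false]
      rw [ih]
      simp

lemma pvStrip_remove (l : List Int) (f : Int → Int) (v : Int)
    (hf : ∀ x, 0 ≤ f x) (hm : v ∈ pvStrip f l) :
    PySem.List.remove? (pvStrip f l) v = some (pvStrip (pvBump v f) l) := by
  induction l generalizing f with
  | nil => simp [pvStrip] at hm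
  | cons j l ih =>
    by_cases h : 0 < f j
    · have hb : 0 < pvBump v f j := by
        by_cases hv : j = v
        · have := hf v; simp [pvBump, hv]; omega
        · simpa [pvBump, hv] using h
      simp only [pvStrip, if_pos h, if_pos hb] at hm ⊢
      have hcomm : pvDec j (pvBump v f) = pvBump v (pvDec j f) := by
        funext x; by_cases h1 : x = j <;> by_cases h2 : x = v <;>
          simp [pvDec, pvBump, h1, h2] <;> omega
      rw [hcomm]
      exact ih (pvDec j f) (fun x => by have := hf x; by_cases hx : x = j <;> simp [pvDec, hx] <;> omega) hm
    · simp only [pvStrip, if_neg h] at hm ⊢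
      by_cases hv : j = v
      · subst hv
        have hz : f j = 0 := le_antisymm (by omega) (hf j)
        rw [PySem.List.remove?_cons_self]
        have hpos : 0 < pvBump j f j := by simp [pvBump, hz]
        simp only [if_pos hpos]
        congr 2
        funext x; by_cases hx : x = j <;> simp [pvDec, pvBump, hx]
      · have hm' : v ∈ pvStrip f l := by
          rcases List.mem_cons.mp hm with h1 | h1
          · exact absurd h1.symm hv
          · exact h1
        rw [PySem.List.remove?_cons_of_ne _ hv, ih f hf hm']
        have hnp : ¬ 0 < pvBump v f j := by simpa [pvBump, hv] using h
        simp only [if_neg hnp, Option.map_some]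

-- the main loop invariant: A's fold over the remaining suffix equals B's, given the
-- relation between A's state (matches, un1 ++ rest, u2) and B's (cnt, used, matches, un1)
lemma pvMain (list2 : List Int) (rest : List Int) (ms : List (Int × Int))
    (un1 u2 : List Int) (cnt used : PySem.Dict Int Int)
    (h1 : ∀ v, cnt.getD v 0 = (u2.count v : Int))
    (h2 : ∀ v ∈ un1, u2.count v = 0)
    (h3 : u2 = pvStrip (fun v => used.getD v 0) list2)
    (h4 : ∀ v, 0 ≤ used.getD v 0) :
    rest.foldl pvStepA (ms, un1 ++ rest, u2)
      = ((rest.foldl pvStepB (cnt, used, ms, un1)).2.2.1,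
         (rest.foldl pvStepB (cnt, used, ms, un1)).2.2.2,
         pvStrip (fun v => (rest.foldl pvStepB (cnt, used, ms, un1)).2.1.getD v 0) list2) := by
  induction rest generalizing ms un1 u2 cnt used with
  | nil => simp [← h3]
  | cons i rest ih =>
    simp only [List.foldl_cons]
    by_cases hmem : i ∈ u2
    · have hcpos : 0 < u2.count i := List.count_pos_iff.mpr hmem
      have hcnt : 0 < cnt.getD i 0 := by rw [h1]; exact_mod_cast hcpos
      have hni : i ∉ un1 := fun hin => by have := h2 i hin; omega
      have hrm1 : PySem.List.remove? (un1 ++ i :: rest) i = some (un1 ++ rest) := by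
        rw [PySem.List.remove?_eq_some_erase _ i (by simp),
          List.erase_append_right _ hni, List.erase_cons_head]
      have hrm2 : PySem.List.remove? u2 i
          = some (pvStrip (fun v => (pvBump i fun v => used.getD v 0) v) list2) := by
        rw [h3] at hmem ⊢
        exact pvStrip_remove list2 _ i h4 hmem
      have hrm2' : PySem.List.remove? u2 i = some (u2.erase i) :=
        PySem.List.remove?_eq_some_erase u2 i hmem
      rw [pvStepA, pvStepB]
      simp only [hmem, if_pos, hcnt]
      simp only [hrm1, hrm2', Option.getD_some]
      rw [ih (ms ++ [(i, i)]) un1 (u2.erase i) _ _]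
      · intro v
        rw [PySem.Dict.getD_insert]
        by_cases hv : v = i
        · subst hv
          rw [if_pos rfl, h1, List.count_erase_self]
          omega
        · rw [if_neg hv, h1, List.count_erase_of_ne (by exact fun h => hv h)]
      · intro v hv
        have h0 := h2 v hv
        have hle : (u2.erase i).count v ≤ u2.count v :=
          (List.erase_sublist ..).count_le v
        omega
      · have : u2.erase i = pvStrip (fun v => (pvBump i fun v => used.getD v 0) v) list2 := by
          rw [← Option.some_inj, ← hrm2', hrm2]
        rw [this]
        congr 2
        funext v
        rw [PySem.Dict.getD_insert]
        by_cases hv : v = i <;> simp [pvBump, hv]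
      · intro v
        rw [PySem.Dict.getD_insert]
        by_cases hv : v = i
        · rw [if_pos hv]; have := h4 i; omega
        · rw [if_neg hv]; exact h4 v
    · have hc0 : u2.count i = 0 := by
        by_contra hne; exact hmem (List.count_pos_iff.mp (Nat.pos_of_ne_zero hne))
      have hcnt : ¬ 0 < cnt.getD i 0 := by rw [h1, hc0]; omega
      rw [pvStepA, pvStepB]
      simp only [hmem, if_false, hcnt]
      have hsplit : un1 ++ i :: rest = (un1 ++ [i]) ++ rest := by simp
      rw [hsplit, ih ms (un1 ++ [i]) u2 cnt used h1 _ h3 h4]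
      intro v hv
      rcases List.mem_append.mp hv with hx | hx
      · exact h2 v hx
      · simp at hx; subst hx; exact hc0

-- ===== VERDICT (by name: the statement is the Claim_ definition above) =====
theorem match_lists_spec : Claim_equal_match_lists := by
  intro list1 list2 _
  show match_lists list1 list2 = match_lists_alt list1 list2
  rw [match_lists, match_lists_alt]
  simp only [pvStepB2_foldl, List.nil_append]
  have h0 : ∀ v : Int, (pvCnt list2).getD v 0 = (list2.count v : Int) := by
    intro v
    rw [pvCnt, PySem.Dict.getD_foldl_insert_add_one]
    simp
  have hstrip : list2 = pvStrip (fun v => (PySem.Dict.empty : PySem.Dict Int Int).getD v 0) list2 := by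
    have he : (fun v => (PySem.Dict.empty : PySem.Dict Int Int).getD v 0) = fun _ => (0 : Int) := by
      funext v; simp
    rw [he, pvStrip_zero]
  have hm := pvMain list2 list1 [] [] list2 (pvCnt list2) PySem.Dict.empty h0
    (by intro v hv; simp at hv) hstrip (by intro v; simp)
  simpa using hm
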